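-- pv_equiv track=rewrite | github.com/estilen/ait-easytimetable | utils/agent.py | _parse_lecturer_name
-- ===== SOURCE A (Python) =====
-- def _parse_lecturer_name(string):
--     if "ZZZ" in string:
--         return string
--     if ";" in string:
--         names = [[n.strip().capitalize()
--                   for n in name.split(",")][::-1]
--                  for name in string.split(";")]
--         return "; ".join([" ".join(name) for name in names])
--     return " ".join([n.strip().capitalize()
--                      for n in string.split(",")][::-1])
-- ===== SOURCE B (Python) =====
-- def _parse_lecturer_name(string):
--     if "ZZZ" in string:
--         return string
--     out = []       # finished, formatted segments
--     parts = []     # formatted tokens of the current segment, newest first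
--     tok = []       # characters of the current token
--     for ch in string:
--         if ch == ',':
--             parts.insert(0, "".join(tok).strip().capitalize())
--             tok = []
--         elif ch == ';':
--             parts.insert(0, "".join(tok).strip().capitalize())
--             out.append(" ".join(parts))
--             parts = []
--             tok = []
--         else:
--             tok.append(ch)
--     parts.insert(0, "".join(tok).strip().capitalize())
--     out.append(" ".join(parts))
--     return "; ".join(out)
-- ===== Notes on version B (the rewrite author's own statement) =====
-- stated objective: alternative
-- what changed: Replaces A's two branches of nested split/strip/capitalize comprehensions with a single left-to-right character scan: a small state machine that accumulates the current token, prepends its formatted form to the current segment's parts on ',', and flushes the segment on ';', so the string is traversed once and no split/reverse passes are made.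
import Mathlib
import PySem

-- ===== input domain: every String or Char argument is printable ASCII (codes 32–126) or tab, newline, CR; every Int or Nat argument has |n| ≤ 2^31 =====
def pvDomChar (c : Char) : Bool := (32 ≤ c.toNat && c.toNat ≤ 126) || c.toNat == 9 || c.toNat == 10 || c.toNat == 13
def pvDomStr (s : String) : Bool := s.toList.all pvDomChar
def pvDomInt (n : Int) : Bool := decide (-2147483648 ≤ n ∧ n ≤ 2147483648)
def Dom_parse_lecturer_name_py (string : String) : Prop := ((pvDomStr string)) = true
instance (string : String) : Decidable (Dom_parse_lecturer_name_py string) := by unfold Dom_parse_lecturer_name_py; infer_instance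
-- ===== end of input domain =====

-- B replaces A's two split/comprehension branches by a single left-to-right character scan
-- with an accumulator (a small state machine over ',' and ';'); objective: alternative.

-- Python str.capitalize(): first char uppercased, rest lowercased (exact on the ASCII domain)
def pvCap (l : List Char) : List Char :=
  match l with
  | [] => []
  | c :: cs => PySem.Chars.upperChar c :: PySem.Chars.lower cs

-- ===== PORT A =====
def parse_lecturer_name_py (string : String) : String :=
  if PySem.Str.isIn "ZZZ" string then string
  else if PySem.Str.isIn ";" string then
    let names := (PySem.Chars.splitOn string.toList [';']).map
      (fun name => ((PySem.Chars.splitOn name [',']).map (fun n => pvCap (PySem.Chars.strip n))).reverse)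
    String.ofList (PySem.Chars.join [';', ' '] (names.map (fun name => PySem.Chars.join [' '] name)))
  else
    String.ofList (PySem.Chars.join [' ']
      (((PySem.Chars.splitOn string.toList [',']).map (fun n => pvCap (PySem.Chars.strip n))).reverse))

-- ===== PORT B =====
-- "".join(tok).strip().capitalize()
def pvFlush (tok : List Char) : List Char := pvCap (PySem.Chars.strip tok)

-- the for-loop of B: state = (out, parts, tok); final flush at the end of the string
def pvScan : List Char → List (List Char) → List (List Char) → List Char → List (List Char)
  | [], out, parts, tok => out ++ [PySem.Chars.join [' '] (pvFlush tok :: parts)]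
  | c :: rest, out, parts, tok =>
    if c = ',' then pvScan rest out (pvFlush tok :: parts) []
    else if c = ';' then
      pvScan rest (out ++ [PySem.Chars.join [' '] (pvFlush tok :: parts)]) [] []
    else pvScan rest out parts (tok ++ [c])

def parse_lecturer_name_py_alt (string : String) : String :=
  if PySem.Str.isIn "ZZZ" string then string
  else String.ofList (PySem.Chars.join [';', ' '] (pvScan string.toList [] [] []))

-- ===== PRECONDITION & SPEC =====
def Spec_parse_lecturer_name_py (string : String) (out : String) : Prop := out = parse_lecturer_name_py_alt string
instance (string : String) (out : String) : Decidable (Spec_parse_lecturer_name_py string out) := by unfold Spec_parse_lecturer_name_py; infer_instance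

-- ===== CLAIM (what is proved, stated in full; the proofs are below) =====
def Claim_equal_parse_lecturer_name_py : Prop := ∀ (string : String), Dom_parse_lecturer_name_py string → Spec_parse_lecturer_name_py string (parse_lecturer_name_py string)

-- ===== LEMMAS AND PROOFS =====

-- simple recursive splitter on a single character: (first piece, remaining pieces)
def splitC (a : Char) : List Char → List Char × List (List Char)
  | [] => ([], [])
  | c :: l =>
    let r := splitC a l
    if c = a then ([], r.1 :: r.2) else (c :: r.1, r.2)

theorem splitOn_go_single (a : Char) :
    ∀ (fuel : Nat) (l cur : List Char) (accs : List (List Char)), l.length < fuel →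
      PySem.Chars.splitOn.go [a] fuel l cur accs
        = accs.reverse ++ ((cur.reverse ++ (splitC a l).1) :: (splitC a l).2) := by
  intro fuel
  induction fuel with
  | zero => intro l cur accs h; omega
  | succ n ih =>
    intro l cur accs h
    match l with
    | [] => simp [PySem.Chars.splitOn.go, splitC]
    | c :: rest =>
      by_cases hc : c = a
      · subst hc
        have hpre : List.isPrefixOf [c] (c :: rest) = true := by simp [List.isPrefixOf]
        rw [PySem.Chars.splitOn.go]
        simp only [hpre, if_true, List.length_cons, List.length_nil, List.drop_succ_cons,
          List.drop_zero]
        rw [ih rest [] (cur.reverse :: accs) (by simp at h ⊢; omega)]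
        simp [splitC]
      · have hpre : List.isPrefixOf [a] (c :: rest) = false := by
          simp [List.isPrefixOf]; exact fun hac => (hc hac.symm).elim
        rw [PySem.Chars.splitOn.go]
        simp only [hpre, Bool.false_eq_true, if_false]
        rw [ih rest (c :: cur) accs (by simp at h ⊢; omega)]
        simp [splitC, hc]

theorem splitOn_eq_splitC (a : Char) (l : List Char) :
    PySem.Chars.splitOn l [a] = (splitC a l).1 :: (splitC a l).2 := by
  rw [PySem.Chars.splitOn, splitOn_go_single a (l.length + 1) l [] [] (by omega)]
  simp

theorem splitC_not_mem (a : Char) (l : List Char) (h : a ∉ l) : splitC a l = (l, []) := by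
  induction l with
  | nil => rfl
  | cons c rest ih =>
    have hc : ¬ c = a := fun h2 => h (h2 ▸ List.mem_cons_self)
    have h2 : a ∉ rest := fun hm => h (List.mem_cons_of_mem _ hm)
    simp [splitC, hc, ih h2]

-- formatted value of one ';'-segment, as A computes it (after splitOn is rewritten to splitC)
def fmtSeg (seg : List Char) : List Char :=
  PySem.Chars.join [' '] ((((splitC ',' seg).1 :: (splitC ',' seg).2).map pvFlush).reverse)

-- formatted value of the first (partially consumed) segment given the scan state
def fmtFirst (tok : List Char) (parts : List (List Char)) (seg : List Char) : List Char :=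
  PySem.Chars.join [' ']
    (((pvFlush (tok ++ (splitC ',' seg).1) :: ((splitC ',' seg).2).map pvFlush).reverse) ++ parts)

theorem fmtFirst_nil_nil (seg : List Char) : fmtFirst [] [] seg = fmtSeg seg := by
  simp [fmtFirst, fmtSeg]

-- loop invariant of B's scan
theorem pvScan_inv :
    ∀ (l : List Char) (out parts : List (List Char)) (tok : List Char),
      pvScan l out parts tok
        = out ++ (fmtFirst tok parts (splitC ';' l).1 :: ((splitC ';' l).2).map fmtSeg) := by
  intro l
  induction l with
  | nil =>
    intro out parts tok
    simp [pvScan, splitC, fmtFirst]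
  | cons c rest ih =>
    intro out parts tok
    by_cases hcomma : c = ','
    · subst hcomma
      rw [pvScan]
      simp only [if_true, ih]
      have h1 : splitC ';' (',' :: rest) = (',' :: (splitC ';' rest).1, (splitC ';' rest).2) := by
        simp [splitC]
      rw [h1]
      congr 1
      simp [fmtFirst, splitC, pvFlush]
    · by_cases hsemi : c = ';'
      · subst hsemi
        rw [pvScan]
        simp only [hcomma, if_false, if_true, ih]
        have h1 : splitC ';' (';' :: rest) = ([], (splitC ';' rest).1 :: (splitC ';' rest).2) := by
          simp [splitC]
        rw [h1]
        simp [fmtFirst, splitC, fmtSeg]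
      · rw [pvScan]
        simp only [hcomma, hsemi, if_false, ih]
        have h1 : splitC ';' (c :: rest) = (c :: (splitC ';' rest).1, (splitC ';' rest).2) := by
          simp [splitC, hsemi]
        rw [h1]
        congr 1
        have h2 : splitC ',' (c :: (splitC ';' rest).1)
            = (c :: (splitC ',' (splitC ';' rest).1).1, (splitC ',' (splitC ';' rest).1).2) := by
          simp [splitC, hcomma]
        simp [fmtFirst, h2]

theorem pvScan_eq_map (l : List Char) :
    pvScan l [] [] [] = (PySem.Chars.splitOn l [';']).map fmtSeg := by
  rw [pvScan_inv, splitOn_eq_splitC]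
  simp [fmtFirst_nil_nil]

theorem pvFlush_eq : pvFlush = fun n => pvCap (PySem.Chars.strip n) := rfl

theorem mem_of_isIn_single (a : Char) (l : List Char)
    (h : PySem.Chars.isIn [a] l = false) : a ∉ l := by
  intro hmem
  obtain ⟨i, hi, hg⟩ := List.mem_iff_getElem.mp hmem
  have hpre : [a] <+: l.drop i := by
    rw [List.drop_eq_getElem_cons hi, hg]
    exact ⟨_, rfl⟩
  have := (PySem.Chars.exists_prefix_drop_iff_isIn (s := l) (sub := [a])).mp ⟨i, hpre⟩
  simp [this] at h

-- ===== VERDICT (by name: the statement is the Claim_ definition above) =====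
theorem parse_lecturer_name_py_spec : Claim_equal_parse_lecturer_name_py := by
  intro s _
  unfold Spec_parse_lecturer_name_py parse_lecturer_name_py parse_lecturer_name_py_alt
  by_cases hz : PySem.Str.isIn "ZZZ" s = true
  · simp only [hz, if_true]
  · have hz' : PySem.Str.isIn "ZZZ" s = false := (Bool.not_eq_true _).mp hz
    simp only [hz', Bool.false_eq_true, if_false]
    rw [pvScan_eq_map]
    by_cases hs : PySem.Str.isIn ";" s = true
    · simp only [hs, if_true, List.map_map]
      congr 2
      apply List.map_congr_left
      intro seg _
      simp [fmtSeg, Function.comp, splitOn_eq_splitC, pvFlush_eq]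
    · have hs' : PySem.Str.isIn ";" s = false := (Bool.not_eq_true _).mp hs
      simp only [hs', Bool.false_eq_true, if_false]
      have hnm : ';' ∉ s.toList := by
        apply mem_of_isIn_single
        rw [PySem.Str.isIn_eq] at hs'
        exact hs'
      rw [splitOn_eq_splitC ';' s.toList, splitC_not_mem ';' s.toList hnm]
      simp [fmtSeg, PySem.Chars.join_singleton, splitOn_eq_splitC, pvFlush_eq]
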